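-- pv_equiv track=rewrite | github.com/Ross0907/IC-Authenticator | dynamic_yolo_ocr.py | _combine_texts
-- ===== SOURCE A (Python) =====
-- from typing import List, Tuple, Dict, Optional
--
-- def _combine_texts(texts: List[str]) -> str:
--     """Combine multiple text extractions intelligently"""
--     if not texts:
--         return ""
--
--     if len(texts) == 1:
--         return texts[0]
--
--     # Select the longest, most complete text
--     # Sort by length descending
--     sorted_texts = sorted(texts, key=len, reverse=True)
--
--     # Return the longest one that contains meaningful content
--     for text in sorted_texts:
--         if len(text.strip()) >= 5:  # At least 5 characters
--             return text
--
--     # Fallback: combine all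
--     combined = ' '.join(texts)
--     combined = ' '.join(combined.split())
--     return combined
-- ===== SOURCE B (Python) =====
-- from typing import List
--
-- def _combine_texts(texts: List[str]) -> str:
--     """Combine multiple text extractions intelligently (single linear pass instead of sorting)."""
--     if not texts:
--         return ""
--     if len(texts) == 1:
--         return texts[0]
--     # One pass: keep the earliest longest text with >= 5 non-space characters stripped
--     best = None
--     for t in texts:
--         if len(t.strip()) >= 5 and (best is None or len(t) > len(best)):
--             best = t
--     if best is not None:
--         return best
--     return ' '.join(' '.join(texts).split())
-- ===== Notes on version B (the rewrite author's own statement) =====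
-- stated objective: alternative
-- what changed: Replaces the stable descending sort plus scan with a single linear pass that tracks the earliest strictly-longest candidate whose stripped length is at least 5.
import Mathlib
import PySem

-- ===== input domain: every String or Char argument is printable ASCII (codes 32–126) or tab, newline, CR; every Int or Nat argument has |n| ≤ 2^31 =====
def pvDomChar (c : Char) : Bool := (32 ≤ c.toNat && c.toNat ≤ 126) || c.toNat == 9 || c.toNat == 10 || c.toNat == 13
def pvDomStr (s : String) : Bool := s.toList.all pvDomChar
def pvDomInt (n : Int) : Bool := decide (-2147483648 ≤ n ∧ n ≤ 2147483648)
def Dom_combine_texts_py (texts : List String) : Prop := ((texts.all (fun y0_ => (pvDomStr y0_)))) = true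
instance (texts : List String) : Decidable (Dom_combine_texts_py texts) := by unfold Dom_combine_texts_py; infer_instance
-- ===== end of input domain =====

-- B replaces A's stable descending sort + scan with one linear pass tracking the best candidate.

-- the guard "len(text.strip()) >= 5" shared by both programs
def pvP (t : String) : Bool := decide (5 ≤ PySem.Str.len (PySem.Str.strip t))

-- ===== PORT A =====
def combine_texts_py (texts : List String) : String :=
  if texts = [] then ""
  else if texts.length = 1 then (PySem.List.pyGet? texts 0).getD ""
  else
    let sorted_texts := PySem.List.sorted texts PySem.Str.len true
    match sorted_texts.find? pvP with
    | some t => t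
    | none => PySem.Str.join " " (PySem.Str.split₀ (PySem.Str.join " " texts))

-- ===== PORT B =====
-- loop body of B's single pass: update the running best candidate
def pvStep (best : Option String) (t : String) : Option String :=
  if pvP t && (match best with
               | none => true
               | some b => decide (PySem.Str.len b < PySem.Str.len t)) then some t else best

def combine_texts_py_alt (texts : List String) : String :=
  if texts = [] then ""
  else if texts.length = 1 then (PySem.List.pyGet? texts 0).getD ""
  else
    match texts.foldl pvStep none with
    | some t => t
    | none => PySem.Str.join " " (PySem.Str.split₀ (PySem.Str.join " " texts))

-- ===== PRECONDITION & SPEC =====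
def Spec_combine_texts_py (texts : List String) (out : String) : Prop := out = combine_texts_py_alt texts
instance (texts : List String) (out : String) : Decidable (Spec_combine_texts_py texts out) := by unfold Spec_combine_texts_py; infer_instance

-- ===== CLAIM (what is proved, stated in full; the proofs are below) =====
def Claim_equal_combine_texts_py : Prop := ∀ (texts : List String), Dom_combine_texts_py texts → Spec_combine_texts_py texts (combine_texts_py texts)

-- ===== LEMMAS AND PROOFS =====

-- one unfolding step of PySem's insertion
lemma insertBy_len_cons (x y : String) (ys : List String) :
    PySem.List.insertBy (fun a b => decide (PySem.Str.len b < PySem.Str.len a)) x (y :: ys)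
      = if PySem.Str.len y < PySem.Str.len x then x :: y :: ys
        else y :: PySem.List.insertBy (fun a b => decide (PySem.Str.len b < PySem.Str.len a)) x ys := by
  by_cases h : PySem.Str.len y < PySem.Str.len x
  · simp [PySem.List.insertBy]
  · simp [PySem.List.insertBy]


-- inserting x into a descending-by-length list commutes with find? pvP via pvStep
lemma find?_insertBy_pvP (x : String) (S : List String)
    (hS : S.Pairwise (fun a b => PySem.Str.len b ≤ PySem.Str.len a)) :
    (PySem.List.insertBy (fun a b => decide (PySem.Str.len b < PySem.Str.len a)) x S).find? pvP
      = pvStep (S.find? pvP) x := by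
  induction S with
  | nil => simp [PySem.List.insertBy, pvStep, List.find?]
  | cons y ys ih =>
    rcases List.pairwise_cons.mp hS with ⟨hy, hys⟩
    rw [insertBy_len_cons]
    by_cases hlt : PySem.Str.len y < PySem.Str.len x
    · -- x is inserted in front of y
      rw [if_pos hlt]
      cases hPx : pvP x with
      | true =>
        cases hfind : (y :: ys).find? pvP with
        | none => simp [List.find?, hPx, pvStep]
        | some b =>
          have hb : b ∈ y :: ys := List.mem_of_find?_eq_some hfind
          have hble : PySem.Str.len b ≤ PySem.Str.len y := by
            rcases List.mem_cons.mp hb with rfl | hb'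
            · exact le_refl _
            · exact hy b hb'
          have hbx : b.length < x.length := by
            have := lt_of_le_of_lt hble hlt
            simp [PySem.Str.len_eq] at this; exact this
          simp [List.find?, hPx, pvStep]
          intro h
          exact absurd h (not_le.mpr hbx)
      | false => simp [List.find?, hPx, pvStep]
    · -- x goes after y
      rw [if_neg hlt]
      cases hPy : pvP y with
      | true =>
        have hlt' : ¬ y.length < x.length := by
          simp [PySem.Str.len_eq] at hlt; omega
        simp [List.find?, hPy, pvStep]
        intro _ h
        exact absurd h hlt'
      | false =>
        rw [List.find?_cons_of_neg (by simp [hPy]), List.find?_cons_of_neg (by simp [hPy])]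
        exact ih hys

-- pushing the whole list through insertion sort, find? equals B's foldl
lemma foldl_insert_find? (l : List String) : ∀ pref : List String,
    ((l.foldl (fun acc x => PySem.List.insertBy (fun a b => decide (PySem.Str.len b < PySem.Str.len a)) x acc)
        (PySem.List.sorted pref PySem.Str.len true)).find? pvP)
      = l.foldl pvStep ((PySem.List.sorted pref PySem.Str.len true).find? pvP) := by
  induction l with
  | nil => intro pref; rfl
  | cons x l ih =>
    intro pref
    have hins : PySem.List.insertBy (fun a b => decide (PySem.Str.len b < PySem.Str.len a)) x
        (PySem.List.sorted pref PySem.Str.len true) = PySem.List.sorted (pref ++ [x]) PySem.Str.len true := by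
      rw [PySem.List.sorted_rev_eq_foldl_insertBy, PySem.List.sorted_rev_eq_foldl_insertBy,
        List.foldl_append]
      rfl
    have hstep : (PySem.List.sorted (pref ++ [x]) PySem.Str.len true).find? pvP
        = pvStep ((PySem.List.sorted pref PySem.Str.len true).find? pvP) x := by
      rw [← hins]
      exact find?_insertBy_pvP x _ (PySem.List.sorted_pairwise_rev pref PySem.Str.len)
    simp only [List.foldl_cons, hins, ih (pref ++ [x]), hstep]

lemma find?_sorted_eq_foldl (texts : List String) :
    (PySem.List.sorted texts PySem.Str.len true).find? pvP = texts.foldl pvStep none := by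
  have h := foldl_insert_find? texts []
  simpa [PySem.List.sorted_rev_eq_foldl_insertBy] using h

-- ===== VERDICT (by name: the statement is the Claim_ definition above) =====
theorem combine_texts_py_spec : Claim_equal_combine_texts_py := by
  intro texts _
  unfold Spec_combine_texts_py combine_texts_py combine_texts_py_alt
  simp only [find?_sorted_eq_foldl]
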